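-- pv_equiv track=rewrite | github.com/JeliPenguin/Bachelor-Project | Code/GuideAndScout/Agents/MessageRecoverer.py | findRecallIndex
-- ===== SOURCE A (Python) =====
-- def findRecallIndex(recievedHistory):
--     i = len(recievedHistory)
--     eps = 0
--     while i > 0:
--         i -= 1
--         if recievedHistory[i]["sPrime"] is not None:
--             eps += 1
--         if recievedHistory[i]["checksum"]:
--             return i, eps
--     return -1, 0
-- ===== SOURCE B (Python) =====
-- def findRecallIndex(recievedHistory):
--     # phase 1: scan backward for the last entry with a truthy checksum
--     for i in range(len(recievedHistory) - 1, -1, -1):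
--         if recievedHistory[i]["checksum"]:
--             # phase 2: count sPrime entries in the suffix starting at i
--             return i, sum(1 for e in recievedHistory[i:] if e["sPrime"] is not None)
--     return -1, 0
-- ===== Notes on version B (the rewrite author's own statement) =====
-- stated objective: simpler
-- what changed: Replaced the fused backward loop with a running sPrime counter by a two-phase decomposition: a backward search for the last truthy-checksum index, then a separate one-liner counting sPrime entries in that suffix.
import Mathlib
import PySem

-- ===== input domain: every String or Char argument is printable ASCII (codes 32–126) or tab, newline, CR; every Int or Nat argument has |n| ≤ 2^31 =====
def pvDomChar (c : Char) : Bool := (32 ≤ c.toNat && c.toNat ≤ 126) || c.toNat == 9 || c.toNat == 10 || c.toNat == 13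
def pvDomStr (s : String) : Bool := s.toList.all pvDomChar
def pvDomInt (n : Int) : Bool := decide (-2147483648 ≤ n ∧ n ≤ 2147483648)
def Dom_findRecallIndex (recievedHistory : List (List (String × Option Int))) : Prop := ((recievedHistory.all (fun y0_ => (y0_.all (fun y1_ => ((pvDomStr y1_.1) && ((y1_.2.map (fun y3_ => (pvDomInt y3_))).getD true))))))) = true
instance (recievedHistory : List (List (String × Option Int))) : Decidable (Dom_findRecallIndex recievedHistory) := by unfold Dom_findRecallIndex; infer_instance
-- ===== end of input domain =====

-- B splits A's fused backward loop (running sPrime counter) into a backward search for the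
-- last truthy-checksum index followed by a separate count over that suffix; same cost, simpler.

-- Python truthiness of a dict value that is None or an int
def pvTruthy (v : Option Int) : Bool :=
  match v with
  | none => false
  | some z => z != 0

-- ===== PORT A =====
-- the while-loop of A: i counts down; eps accumulates; none = KeyError (excluded by Pre_)
def findRecallIndexLoop (h : List (List (String × Option Int))) :
    Nat → Int → Option (Int × Int)
  | 0, _ => some (-1, 0)
  | i + 1, eps =>
    match h[i]? with
    | none => none
    | some e =>
      match (PySem.Dict.mk e).get? "sPrime" with
      | none => none
      | some sp =>
        let eps' := if sp ≠ none then eps + 1 else eps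
        match (PySem.Dict.mk e).get? "checksum" with
        | none => none
        | some ck =>
          if pvTruthy ck then some ((i : Int), eps')
          else findRecallIndexLoop h i eps'

def findRecallIndex (recievedHistory : List (List (String × Option Int))) : Int × Int :=
  (findRecallIndexLoop recievedHistory recievedHistory.length 0).getD (-1, 0)

-- ===== PORT B =====
-- phase 2 of B: sum(1 for e in suffix if e["sPrime"] is not None); none = KeyError
def countSPrime : List (List (String × Option Int)) → Option Int
  | [] => some 0
  | e :: t =>
    match (PySem.Dict.mk e).get? "sPrime" with
    | none => none
    | some sp =>
      match countSPrime t with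
      | none => none
      | some r => some ((if sp ≠ none then (1 : Int) else 0) + r)

-- phase 1 of B: backward search for the last truthy checksum
def findRecallIndexAltLoop (h : List (List (String × Option Int))) :
    Nat → Option (Int × Int)
  | 0 => some (-1, 0)
  | i + 1 =>
    match h[i]? with
    | none => none
    | some e =>
      match (PySem.Dict.mk e).get? "checksum" with
      | none => none
      | some ck =>
        if pvTruthy ck then
          match countSPrime (h.drop i) with
          | none => none
          | some c => some ((i : Int), c)
        else findRecallIndexAltLoop h i

def findRecallIndex_alt (recievedHistory : List (List (String × Option Int))) : Int × Int :=
  (findRecallIndexAltLoop recievedHistory recievedHistory.length).getD (-1, 0)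

-- ===== PRECONDITION & SPEC =====
-- entry at index m has both keys
def pvOkAt (h : List (List (String × Option Int))) (m : Nat) : Bool :=
  match h[m]? with
  | none => false
  | some e => ((PySem.Dict.mk e).get? "sPrime").isSome && ((PySem.Dict.mk e).get? "checksum").isSome

-- entry at index m has a truthy checksum
def pvTruthyAt (h : List (List (String × Option Int))) (m : Nat) : Bool :=
  match h[m]? with
  | none => false
  | some e => (((PySem.Dict.mk e).get? "checksum").getD none |> pvTruthy)

-- Pre_: exactly the inputs on which A returns (no KeyError): every entry that the backward
-- scan reaches (i.e. with only keyed, checksum-falsy entries after it) carries both keys.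
def Pre_findRecallIndex (recievedHistory : List (List (String × Option Int))) : Prop :=
  ∀ i, i < recievedHistory.length →
    (∀ m, m < recievedHistory.length → i < m →
        pvOkAt recievedHistory m = true ∧ pvTruthyAt recievedHistory m = false) →
    pvOkAt recievedHistory i = true

instance (recievedHistory : List (List (String × Option Int))) : Decidable (Pre_findRecallIndex recievedHistory) := by unfold Pre_findRecallIndex; infer_instance

def pvWitness_findRecallIndex : (List (List (String × Option Int))) :=
  [[("sPrime", some 3), ("checksum", some 1)], [("sPrime", none), ("checksum", none)]]

def Spec_findRecallIndex (recievedHistory : List (List (String × Option Int))) (out : Int × Int) : Prop := out = findRecallIndex_alt recievedHistory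
instance (recievedHistory : List (List (String × Option Int))) (out : Int × Int) : Decidable (Spec_findRecallIndex recievedHistory out) := by unfold Spec_findRecallIndex; infer_instance

-- ===== CLAIM (what is proved, stated in full; the proofs are below) =====
def Claim_equal_findRecallIndex : Prop := ∀ (recievedHistory : List (List (String × Option Int))), Dom_findRecallIndex recievedHistory → Pre_findRecallIndex recievedHistory → Spec_findRecallIndex recievedHistory (findRecallIndex recievedHistory)


-- ===== LEMMAS AND PROOFS =====

-- all entries from index i to the end are keyed and checksum-falsy (the "loop continued" invariant)
def pvClear (h : List (List (String × Option Int))) (i : Nat) : Prop :=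
  ∀ m, i ≤ m → m < h.length → pvOkAt h m = true ∧ pvTruthyAt h m = false

theorem pvLoop_eq (h : List (List (String × Option Int))) (hp : Pre_findRecallIndex h) :
    ∀ i, i ≤ h.length → pvClear h i →
      ∀ c, countSPrime (h.drop i) = some c →
        findRecallIndexLoop h i c = findRecallIndexAltLoop h i := by
  intro i
  induction i with
  | zero => intro _ _ c _; rfl
  | succ i ih =>
    intro hle hclear c hcnt
    have hi : i < h.length := Nat.lt_of_succ_le hle
    have hok : pvOkAt h i = true := hp i hi (fun m h2 h1 => hclear m h1 h2)
    obtain ⟨e, he⟩ : ∃ e, h[i]? = some e := ⟨h[i]'hi, List.getElem?_eq_getElem hi⟩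
    have hdrop : h.drop i = e :: h.drop (i + 1) := by
      obtain ⟨hlt, hv⟩ := List.getElem?_eq_some_iff.mp he
      rw [List.drop_eq_getElem_cons hi, hv]
    have hok' := hok
    rw [pvOkAt, he] at hok'
    obtain ⟨sp, hsp⟩ : ∃ sp, (PySem.Dict.mk e).get? "sPrime" = some sp := by
      rcases hq : (PySem.Dict.mk e).get? "sPrime" with _ | sp
      · simp [hq] at hok'
      · exact ⟨sp, rfl⟩
    obtain ⟨ck, hck⟩ : ∃ ck, (PySem.Dict.mk e).get? "checksum" = some ck := by
      rcases hq : (PySem.Dict.mk e).get? "checksum" with _ | ck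
      · simp [hq] at hok'
      · exact ⟨ck, rfl⟩
    have hdcount : countSPrime (h.drop i) = some ((if sp ≠ none then (1 : Int) else 0) + c) := by
      rw [hdrop, countSPrime, hsp, hcnt]
    have heq : (if sp ≠ none then c + 1 else c) = (if sp ≠ none then (1 : Int) else 0) + c := by
      by_cases hs : sp = none <;> simp [hs] <;> omega
    rw [findRecallIndexLoop, findRecallIndexAltLoop, he]
    simp only [hsp, hck]
    by_cases ht : pvTruthy ck = true
    · simp only [ht, if_true]
      rw [hdcount]
      simp only [heq]
    · have ht' : pvTruthy ck = false := by simpa using ht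
      simp only [ht', Bool.false_eq_true, if_false]
      have htruthyAt : pvTruthyAt h i = false := by
        rw [pvTruthyAt, he]; simp only [hck]; simpa using ht'
      have hclear' : pvClear h i := by
        intro m h1 h2
        rcases Nat.eq_or_lt_of_le h1 with rfl | hlt
        · exact ⟨hok, htruthyAt⟩
        · exact hclear m hlt h2
      have hrec := ih (Nat.le_of_lt hi) hclear'
        ((if sp ≠ none then (1 : Int) else 0) + c) hdcount
      simpa [heq] using hrec

theorem findRecallIndex_spec : Claim_equal_findRecallIndex := by
  unfold Claim_equal_findRecallIndex
  intro h _ hp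
  unfold Spec_findRecallIndex findRecallIndex findRecallIndex_alt
  rw [pvLoop_eq h hp h.length (Nat.le_refl _)
    (fun m h1 h2 => absurd h2 (Nat.not_lt.mpr h1))
    0 (by rw [List.drop_length]; rfl)]
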